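-- pv_equiv track=rewrite | github.com/joshijeet02/india-macro-pulse-intel | systems/01-rbi-comms/engine/mpc_extractor.py | extract_stance
-- ===== SOURCE A (Python) =====
-- from typing import Optional
--
-- _STANCE_PHRASES = [
--     ("withdrawal_of_accommodation", "withdrawal of accommodation"),
--     ("calibrated_tightening",        "calibrated tightening"),
--     ("calibrated_withdrawal",        "calibrated withdrawal of accommodation"),
--     ("accommodative",                "remain accommodative"),
--     ("accommodative",                "stance is accommodative"),
--     ("accommodative",                "accommodative stance"),
--     ("neutral",                      "remain neutral"),
--     ("neutral",                      "neutral stance"),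
--     ("neutral",                      "stance to neutral"),
-- ]
--
-- def extract_stance(text: str) -> tuple[Optional[str], Optional[str]]:
--     """
--     Return (stance_label, raw_phrase).
--
--     Stance labels: 'accommodative' | 'neutral' | 'withdrawal_of_accommodation' |
--     'calibrated_tightening' | 'calibrated_withdrawal'.
--     """
--     lc = text.lower()
--     # Look for the most specific match (longest phrase wins on ties via order)
--     matches: list[tuple[str, str, int]] = []
--     for label, phrase in _STANCE_PHRASES:
--         idx = lc.find(phrase.lower())
--         if idx >= 0:
--             matches.append((label, phrase, idx))
--
--     if not matches:
--         return None, None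
--
--     # Prefer the EARLIEST mention — RBI states the stance early in the document.
--     matches.sort(key=lambda m: m[2])
--     label, phrase, _ = matches[0]
--     return label, phrase
-- ===== SOURCE B (Python) =====
-- from typing import Optional
--
-- _STANCE_PHRASES = [
--     ("withdrawal_of_accommodation", "withdrawal of accommodation"),
--     ("calibrated_tightening",        "calibrated tightening"),
--     ("calibrated_withdrawal",        "calibrated withdrawal of accommodation"),
--     ("accommodative",                "remain accommodative"),
--     ("accommodative",                "stance is accommodative"),
--     ("accommodative",                "accommodative stance"),
--     ("neutral",                      "remain neutral"),
--     ("neutral",                      "neutral stance"),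
--     ("neutral",                      "stance to neutral"),
-- ]
--
--
-- def extract_stance(text):
--     """Scan positions left to right; at the first position where any stance
--     phrase starts, return the first such phrase in list order."""
--     lc = text.lower()
--     for i in range(len(lc)):
--         for label, phrase in _STANCE_PHRASES:
--             if lc.startswith(phrase.lower(), i):
--                 return label, phrase
--     return None, None
-- ===== Notes on version B (the rewrite author's own statement) =====
-- stated objective: alternative
-- what changed: Replaces the per-phrase find + collect-all + stable sort with a left-to-right position scan that returns the first phrase (in list order) starting at the earliest text position, so no intermediate match list and no sort.
import Mathlib
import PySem

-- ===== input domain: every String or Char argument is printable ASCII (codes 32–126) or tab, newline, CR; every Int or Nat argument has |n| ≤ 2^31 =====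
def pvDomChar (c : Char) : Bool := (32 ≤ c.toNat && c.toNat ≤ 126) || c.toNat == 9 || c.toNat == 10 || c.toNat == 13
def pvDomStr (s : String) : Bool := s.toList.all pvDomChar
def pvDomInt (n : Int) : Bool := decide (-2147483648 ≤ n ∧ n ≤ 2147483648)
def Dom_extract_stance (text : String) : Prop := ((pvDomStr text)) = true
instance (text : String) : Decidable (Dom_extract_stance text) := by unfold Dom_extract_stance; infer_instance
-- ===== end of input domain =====

-- B replaces per-phrase find + collect-all + stable sort by a left-to-right position scan
-- returning the first phrase (in list order) starting at the earliest position; objective: alternative.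

-- ===== PORT A =====
def stancePhrasesA : List (String × String) := [
  ("withdrawal_of_accommodation", "withdrawal of accommodation"),
  ("calibrated_tightening",        "calibrated tightening"),
  ("calibrated_withdrawal",        "calibrated withdrawal of accommodation"),
  ("accommodative",                "remain accommodative"),
  ("accommodative",                "stance is accommodative"),
  ("accommodative",                "accommodative stance"),
  ("neutral",                      "remain neutral"),
  ("neutral",                      "neutral stance"),
  ("neutral",                      "stance to neutral")]

def extract_stance (text : String) : Option String × Option String :=
  let lc := PySem.Str.lower text
  let ms : List (String × String × Int) :=
    stancePhrasesA.foldl (fun acc lp =>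
      let idx := PySem.Str.find lc (PySem.Str.lower lp.2)
      if 0 ≤ idx then acc ++ [(lp.1, lp.2, idx)] else acc) []
  if ms = [] then (none, none)
  else
    match PySem.List.sorted ms (fun m => m.2.2) false with
    | [] => (none, none)
    | m :: _ => (some m.1, some m.2.1)

-- ===== PORT B =====
def stancePhrasesB : List (String × String) := [
  ("withdrawal_of_accommodation", "withdrawal of accommodation"),
  ("calibrated_tightening",        "calibrated tightening"),
  ("calibrated_withdrawal",        "calibrated withdrawal of accommodation"),
  ("accommodative",                "remain accommodative"),
  ("accommodative",                "stance is accommodative"),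
  ("accommodative",                "accommodative stance"),
  ("neutral",                      "remain neutral"),
  ("neutral",                      "neutral stance"),
  ("neutral",                      "stance to neutral")]

-- the inner 'for label, phrase in _STANCE_PHRASES: if lc.startswith(phrase.lower(), i): return …'
-- lc.startswith(p, i) with 0 ≤ i is exactly 'p is a prefix of lc[i:]' (ported by hand, exact there)
def pvScanPhrases (lc : List Char) (i : Nat) : List (String × String) → Option (String × String)
  | [] => none
  | lp :: rest =>
      if (PySem.Str.lower lp.2).toList.isPrefixOf (lc.drop i) then some lp
      else pvScanPhrases lc i rest

-- the outer 'for i in range(len(lc)):' with early return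
def pvScanFrom (lc : List Char) (phrases : List (String × String)) : List Nat → Option (String × String)
  | [] => none
  | i :: rest =>
      match pvScanPhrases lc i phrases with
      | some r => some r
      | none => pvScanFrom lc phrases rest

def extract_stance_alt (text : String) : Option String × Option String :=
  let lc := (PySem.Str.lower text).toList
  match pvScanFrom lc stancePhrasesB (List.range lc.length) with
  | some lp => (some lp.1, some lp.2)
  | none => (none, none)

-- ===== PRECONDITION & SPEC =====
def Spec_extract_stance (text : String) (out : Option String × Option String) : Prop := out = extract_stance_alt text
instance (text : String) (out : Option String × Option String) : Decidable (Spec_extract_stance text out) := by unfold Spec_extract_stance; infer_instance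

-- ===== CLAIM (what is proved, stated in full; the proofs are below) =====
def Claim_equal_extract_stance : Prop := ∀ (text : String), Dom_extract_stance text → Spec_extract_stance text (extract_stance text)

-- ===== LEMMAS AND PROOFS =====

-- A's selection recast as a running strict minimum over the phrase list
def pvMinStep (b : Option (String × String × Int)) (m : String × String × Int) :
    Option (String × String × Int) :=
  match b with
  | none => some m
  | some h => if m.2.2 < h.2.2 then some m else b

def pvStep (lc : String) (best : Option (String × String × Int)) (lp : String × String) :
    Option (String × String × Int) :=
  if 0 ≤ PySem.Str.find lc (PySem.Str.lower lp.2) then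
    match best with
    | none => some (lp.1, lp.2, PySem.Str.find lc (PySem.Str.lower lp.2))
    | some b => if PySem.Str.find lc (PySem.Str.lower lp.2) < b.2.2
        then some (lp.1, lp.2, PySem.Str.find lc (PySem.Str.lower lp.2)) else best
  else best

def pvSelA (lc : String) : Option (String × String × Int) :=
  stancePhrasesA.foldl (pvStep lc) none

-- head of an insertBy step = one strict-min step on heads
theorem pv_head_insertBy (x : String × String × Int) (acc : List (String × String × Int)) :
    (PySem.List.insertBy (fun a b => decide (a.2.2 < b.2.2)) x acc).head? =
      pvMinStep acc.head? x := by
  cases acc with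
  | nil => rfl
  | cons h t =>
      simp only [PySem.List.insertBy, pvMinStep]
      split_ifs <;> simp_all

-- head of the insertion-sort fold = strict-min fold over the same list
theorem pv_head_sort_fold (l acc : List (String × String × Int)) :
    (l.foldl (fun acc x => PySem.List.insertBy (fun a b => decide (a.2.2 < b.2.2)) x acc) acc).head? =
      l.foldl pvMinStep acc.head? := by
  induction l generalizing acc with
  | nil => rfl
  | cons x xs ih => rw [List.foldl_cons, List.foldl_cons, ih, pv_head_insertBy]

-- fold fusion: the strict-min loop over the phrases = the strict-min fold over A's collected matches
theorem pv_fold_fusion (lc : String) (ps : List (String × String)) (b : Option (String × String × Int)) :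
    ps.foldl (pvStep lc) b =
      (ps.foldl (fun acc lp =>
        if 0 ≤ PySem.Str.find lc (PySem.Str.lower lp.2)
        then acc ++ [(lp.1, lp.2, PySem.Str.find lc (PySem.Str.lower lp.2))] else acc) []).foldl pvMinStep b := by
  induction ps generalizing b with
  | nil => rfl
  | cons p ps ih =>
      have hsplit : ∀ acc : List (String × String × Int),
          ps.foldl (fun acc lp =>
            if 0 ≤ PySem.Str.find lc (PySem.Str.lower lp.2)
            then acc ++ [(lp.1, lp.2, PySem.Str.find lc (PySem.Str.lower lp.2))] else acc) acc =
          acc ++ ps.foldl (fun acc lp =>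
            if 0 ≤ PySem.Str.find lc (PySem.Str.lower lp.2)
            then acc ++ [(lp.1, lp.2, PySem.Str.find lc (PySem.Str.lower lp.2))] else acc) [] := by
        intro acc
        have h1 := PySem.List.foldl_append_if
          (fun lp : String × String => decide (0 ≤ PySem.Str.find lc (PySem.Str.lower lp.2)))
          (fun lp : String × String => (lp.1, lp.2, PySem.Str.find lc (PySem.Str.lower lp.2)))
          ps acc
        have h2 := PySem.List.foldl_append_if
          (fun lp : String × String => decide (0 ≤ PySem.Str.find lc (PySem.Str.lower lp.2)))
          (fun lp : String × String => (lp.1, lp.2, PySem.Str.find lc (PySem.Str.lower lp.2)))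
          ps []
        simp only [decide_eq_true_eq] at h1 h2
        rw [h1, h2, List.nil_append]
      simp only [List.foldl_cons]
      by_cases h : 0 ≤ PySem.Str.find lc (PySem.Str.lower p.2)
      · have hstep : pvStep lc b p = pvMinStep b (p.1, p.2, PySem.Str.find lc (PySem.Str.lower p.2)) := by
          cases b <;> simp only [pvStep, pvMinStep, if_pos h]
        rw [hstep, ih, if_pos h,
          hsplit ([] ++ [(p.1, p.2, PySem.Str.find lc (PySem.Str.lower p.2))])]
        rw [List.nil_append, List.singleton_append, List.foldl_cons]
      · have hstep : pvStep lc b p = b := by simp only [pvStep, if_neg h]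
        rw [hstep, if_neg h, ih]

-- characterization of the strict-min fold: either nothing matched (the accumulator is
-- returned and bounds every later match), or the result is the first phrase attaining
-- the minimal find value among the list
theorem pv_fold_good (lc : String) (P : List (String × String)) : ∀ acc,
    (P.foldl (pvStep lc) acc = acc ∧
      ∀ q ∈ P, 0 ≤ PySem.Str.find lc (PySem.Str.lower q.2) →
        ∃ b, acc = some b ∧ b.2.2 ≤ PySem.Str.find lc (PySem.Str.lower q.2)) ∨
    (∃ P1 lp P2, P = P1 ++ lp :: P2 ∧
      P.foldl (pvStep lc) acc = some (lp.1, lp.2, PySem.Str.find lc (PySem.Str.lower lp.2)) ∧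
      0 ≤ PySem.Str.find lc (PySem.Str.lower lp.2) ∧
      (∀ b, acc = some b → PySem.Str.find lc (PySem.Str.lower lp.2) < b.2.2) ∧
      (∀ q ∈ P1, 0 ≤ PySem.Str.find lc (PySem.Str.lower q.2) →
        PySem.Str.find lc (PySem.Str.lower lp.2) < PySem.Str.find lc (PySem.Str.lower q.2)) ∧
      (∀ q ∈ P2, 0 ≤ PySem.Str.find lc (PySem.Str.lower q.2) →
        PySem.Str.find lc (PySem.Str.lower lp.2) ≤ PySem.Str.find lc (PySem.Str.lower q.2))) := by
  induction P with
  | nil => intro acc; left; exact ⟨rfl, by simp⟩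
  | cons q rest ih =>
      intro acc
      rw [List.foldl_cons]
      by_cases h0 : 0 ≤ PySem.Str.find lc (PySem.Str.lower q.2)
      · rcases acc with _ | b
        · -- accumulator empty: q becomes the new best
          have hstep : pvStep lc none q = some (q.1, q.2, PySem.Str.find lc (PySem.Str.lower q.2)) := by
            simp only [pvStep, if_pos h0]
          rw [hstep]
          rcases ih (some (q.1, q.2, PySem.Str.find lc (PySem.Str.lower q.2))) with ⟨heq, hall⟩ | ⟨P1, lp, P2, hsp, hres, hpos, haccc, hP1, hP2⟩
          · right
            refine ⟨[], q, rest, rfl, heq, h0, ?_, by simp, ?_⟩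
            · intro b hb; cases hb
            · intro q' hq' hq0
              rcases hall q' hq' hq0 with ⟨b, hb, hble⟩
              cases hb; exact hble
          · right
            refine ⟨q :: P1, lp, P2, by simp [hsp], hres, hpos, ?_, ?_, hP2⟩
            · intro b hb; cases hb
            · intro q' hq'
              rcases List.mem_cons.mp hq' with h | h
              · subst h; intro _; exact haccc _ rfl
              · exact hP1 q' h
        · by_cases hlt : PySem.Str.find lc (PySem.Str.lower q.2) < b.2.2
          · -- q improves the best
            have hstep : pvStep lc (some b) q = some (q.1, q.2, PySem.Str.find lc (PySem.Str.lower q.2)) := by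
              simp only [pvStep, if_pos h0, if_pos hlt]
            rw [hstep]
            rcases ih (some (q.1, q.2, PySem.Str.find lc (PySem.Str.lower q.2))) with ⟨heq, hall⟩ | ⟨P1, lp, P2, hsp, hres, hpos, haccc, hP1, hP2⟩
            · right
              refine ⟨[], q, rest, rfl, heq, h0, ?_, by simp, ?_⟩
              · intro b0 hb0; cases hb0; exact hlt
              · intro q' hq' hq0
                rcases hall q' hq' hq0 with ⟨b0, hb0, hble⟩
                cases hb0; exact hble
            · right
              have hlplt : PySem.Str.find lc (PySem.Str.lower lp.2) < PySem.Str.find lc (PySem.Str.lower q.2) :=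
                haccc _ rfl
              refine ⟨q :: P1, lp, P2, by simp [hsp], hres, hpos, ?_, ?_, hP2⟩
              · intro b0 hb0; cases hb0; exact lt_trans hlplt hlt
              · intro q' hq'
                rcases List.mem_cons.mp hq' with h | h
                · subst h; intro _; exact hlplt
                · exact hP1 q' h
          · -- q matches but does not improve
            have hstep : pvStep lc (some b) q = some b := by
              simp only [pvStep, if_pos h0, if_neg hlt]
            rw [hstep]
            rcases ih (some b) with ⟨heq, hall⟩ | ⟨P1, lp, P2, hsp, hres, hpos, haccc, hP1, hP2⟩
            · left
              refine ⟨heq, ?_⟩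
              intro q' hq'
              rcases List.mem_cons.mp hq' with h | h
              · subst h; intro _; exact ⟨b, rfl, by omega⟩
              · exact hall q' h
            · right
              refine ⟨q :: P1, lp, P2, by simp [hsp], hres, hpos, haccc, ?_, hP2⟩
              intro q' hq'
              rcases List.mem_cons.mp hq' with h | h
              · subst h; intro _
                have := haccc _ rfl
                omega
              · exact hP1 q' h
      · -- q does not occur at all
        have hstep : pvStep lc acc q = acc := by
          simp only [pvStep, if_neg h0]
        rw [hstep]
        rcases ih acc with ⟨heq, hall⟩ | ⟨P1, lp, P2, hsp, hres, hpos, haccc, hP1, hP2⟩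
        · left
          refine ⟨heq, ?_⟩
          intro q' hq'
          rcases List.mem_cons.mp hq' with h | h
          · subst h; intro hq0; exact absurd hq0 h0
          · exact hall q' h
        · right
          refine ⟨q :: P1, lp, P2, by simp [hsp], hres, hpos, haccc, ?_, hP2⟩
          intro q' hq'
          rcases List.mem_cons.mp hq' with h | h
          · subst h; intro hq0; exact absurd hq0 h0
          · exact hP1 q' h

-- a phrase that starts at position j has its find at most j (and nonnegative)
theorem pv_prefix_find_le (L pat : List Char) (j : Nat) (h : pat <+: L.drop j) :
    0 ≤ PySem.Chars.find L pat ∧ PySem.Chars.find L pat ≤ (j : Int) := by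
  have hin : PySem.Chars.isIn pat L = true :=
    (PySem.Chars.exists_prefix_drop_iff_isIn pat L).mp ⟨j, h⟩
  have h0 : 0 ≤ PySem.Chars.find L pat :=
    (PySem.Chars.find_nonneg_iff L pat).mpr ((PySem.Chars.isIn_iff_infix pat L).mp hin)
  refine ⟨h0, ?_⟩
  by_contra hgt
  have hj : j < (PySem.Chars.find L pat).toNat := by omega
  exact (PySem.Chars.find_spec h0).2 j hj h

-- no occurrence at all when find is negative
theorem pv_neg_find_no_prefix (L pat : List Char) (h : ¬ 0 ≤ PySem.Chars.find L pat) (j : Nat) :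
    ¬ pat <+: L.drop j :=
  fun hp => h (pv_prefix_find_le L pat j hp).1

-- the inner phrase loop: none when nothing starts here
theorem pv_scanPhrases_none (lc : List Char) (i : Nat) (P : List (String × String))
    (h : ∀ q ∈ P, ¬ (PySem.Str.lower q.2).toList <+: lc.drop i) :
    pvScanPhrases lc i P = none := by
  induction P with
  | nil => rfl
  | cons q rest ih =>
      rw [pvScanPhrases]
      rw [if_neg ?_]
      · exact ih fun q' h' => h q' (List.mem_cons_of_mem _ h')
      · intro hb
        exact h q (List.mem_cons_self ..) (List.isPrefixOf_iff_prefix.mp hb)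

-- the inner phrase loop: first phrase starting here wins
theorem pv_scanPhrases_some (lc : List Char) (i : Nat) (P1 : List (String × String))
    (lp : String × String) (P2 : List (String × String))
    (h1 : ∀ q ∈ P1, ¬ (PySem.Str.lower q.2).toList <+: lc.drop i)
    (h2 : (PySem.Str.lower lp.2).toList <+: lc.drop i) :
    pvScanPhrases lc i (P1 ++ lp :: P2) = some lp := by
  induction P1 with
  | nil =>
      rw [List.nil_append, pvScanPhrases, if_pos (List.isPrefixOf_iff_prefix.mpr h2)]
  | cons q rest ih =>
      rw [List.cons_append, pvScanPhrases]
      rw [if_neg ?_]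
      · exact ih fun q' h' => h1 q' (List.mem_cons_of_mem _ h')
      · intro hb
        exact h1 q (List.mem_cons_self ..) (List.isPrefixOf_iff_prefix.mp hb)

-- the outer position loop distributes over an append of position lists
theorem pv_scanFrom_append (lc : List Char) (P : List (String × String)) (L1 L2 : List Nat) :
    pvScanFrom lc P (L1 ++ L2) =
      (match pvScanFrom lc P L1 with
       | some r => some r
       | none => pvScanFrom lc P L2) := by
  induction L1 with
  | nil => rfl
  | cons i rest ih =>
      rw [List.cons_append, pvScanFrom, pvScanFrom]
      rcases pvScanPhrases lc i P with _ | r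
      · exact ih
      · rfl

theorem pv_scanFrom_none (lc : List Char) (P : List (String × String)) (L : List Nat)
    (h : ∀ i ∈ L, pvScanPhrases lc i P = none) :
    pvScanFrom lc P L = none := by
  induction L with
  | nil => rfl
  | cons i rest ih =>
      rw [pvScanFrom, h i (List.mem_cons_self ..)]
      exact ih fun i' h' => h i' (List.mem_cons_of_mem _ h')

-- every stance phrase is nonempty after lowering
theorem pv_phrases_ne : ∀ lp ∈ stancePhrasesA, (PySem.Str.lower lp.2).toList ≠ [] := by decide

-- the two ports agree, stated over the lowered text (definitionally the two bodies)
theorem pv_final (lc : String) :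
    (if (stancePhrasesA.foldl (fun acc lp =>
          if 0 ≤ PySem.Str.find lc (PySem.Str.lower lp.2)
          then acc ++ [(lp.1, lp.2, PySem.Str.find lc (PySem.Str.lower lp.2))] else acc) []) = []
     then ((none : Option String), (none : Option String))
     else match PySem.List.sorted (stancePhrasesA.foldl (fun acc lp =>
          if 0 ≤ PySem.Str.find lc (PySem.Str.lower lp.2)
          then acc ++ [(lp.1, lp.2, PySem.Str.find lc (PySem.Str.lower lp.2))] else acc) []) (fun m => m.2.2) false with
       | [] => (none, none)
       | m :: _ => (some m.1, some m.2.1)) =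
    (match pvScanFrom lc.toList stancePhrasesB (List.range lc.toList.length) with
     | some lp => (some lp.1, some lp.2)
     | none => ((none : Option String), (none : Option String))) := by
  have hBA : stancePhrasesB = stancePhrasesA := rfl
  rw [hBA]
  have hfind : ∀ lp : String × String,
      PySem.Str.find lc (PySem.Str.lower lp.2) =
        PySem.Chars.find lc.toList (PySem.Str.lower lp.2).toList := by
    intro lp; simp [PySem.Str.find_eq]
  set F : List (String × String × Int) := stancePhrasesA.foldl (fun acc lp =>
      if 0 ≤ PySem.Str.find lc (PySem.Str.lower lp.2)
      then acc ++ [(lp.1, lp.2, PySem.Str.find lc (PySem.Str.lower lp.2))] else acc) [] with hF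
  have hsel : pvSelA lc = F.foldl pvMinStep none := pv_fold_fusion lc stancePhrasesA none
  have hhead : (PySem.List.sorted F (fun m => m.2.2) false).head? = pvSelA lc := by
    rw [PySem.List.sorted_eq_foldl_insertBy, hsel]
    exact pv_head_sort_fold F []
  rcases hgood : pvSelA lc with _ | m
  · -- nothing matched: A yields (none, none) and the scan stays empty
    have hneg : ∀ q ∈ stancePhrasesA, ¬ 0 ≤ PySem.Str.find lc (PySem.Str.lower q.2) := by
      rcases pv_fold_good lc stancePhrasesA none with ⟨heq, hall⟩ | ⟨P1, lp, P2, _, hres, _, _, _, _⟩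
      · intro q hq hq0
        rcases hall q hq hq0 with ⟨b, hb, _⟩
        cases hb
      · rw [show stancePhrasesA.foldl (pvStep lc) none = pvSelA lc from rfl, hgood] at hres
        cases hres
    have hscan : pvScanFrom lc.toList stancePhrasesA (List.range lc.toList.length) = none := by
      apply pv_scanFrom_none
      intro i _
      apply pv_scanPhrases_none
      intro q hq
      exact pv_neg_find_no_prefix _ _ (by rw [← hfind q]; exact hneg q hq) i
    rw [hscan]
    by_cases hnil : F = []
    · rw [if_pos hnil]
    · rw [if_neg hnil]
      rcases hs : PySem.List.sorted F (fun m => m.2.2) false with _ | ⟨m, rest⟩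
      · rfl
      · rw [hs] at hhead
        rw [hgood] at hhead
        cases hhead
  · -- a match exists: both return the earliest-position, earliest-in-list phrase
    rcases pv_fold_good lc stancePhrasesA none with ⟨heq, _⟩ | ⟨P1, lp, P2, hsp, hres, hpos, _, hP1, hP2⟩
    · rw [show stancePhrasesA.foldl (pvStep lc) none = pvSelA lc from rfl, hgood] at heq
      cases heq
    rw [show stancePhrasesA.foldl (pvStep lc) none = pvSelA lc from rfl, hgood] at hres
    injection hres with hres
    subst hres
    -- notation
    set L := lc.toList with hL
    have hposC : 0 ≤ PySem.Chars.find L ((PySem.Str.lower lp.2).toList) := by rw [← hfind]; exact hpos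
    set i0 : Nat := (PySem.Chars.find L ((PySem.Str.lower lp.2).toList)).toNat with hi0
    have hi0eq : (PySem.Chars.find L ((PySem.Str.lower lp.2).toList) : Int) = (i0 : Int) := by omega
    have hspec := PySem.Chars.find_spec hposC
    -- position bound
    have hi0lt : i0 < L.length := by
      by_contra hge
      have hdrop : L.drop i0 = [] := List.drop_eq_nil_of_le (by omega)
      have := hspec.1
      rw [hdrop] at this
      exact pv_phrases_ne lp (by rw [hsp]; exact List.mem_append_right _ (List.mem_cons_self ..))
        (List.prefix_nil.mp this)
    -- any match of any listed phrase is at position ≥ i0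
    have hminN : ∀ q ∈ stancePhrasesA, ∀ j : Nat, (PySem.Str.lower q.2).toList <+: L.drop j → (i0 : Int) ≤ (j : Int) := by
      intro q hq j hpre
      have hle := pv_prefix_find_le L ((PySem.Str.lower q.2).toList) j hpre
      have hmin : PySem.Chars.find L ((PySem.Str.lower lp.2).toList) ≤ PySem.Chars.find L ((PySem.Str.lower q.2).toList) := by
        rw [hsp] at hq
        rcases List.mem_append.mp hq with h | h
        · have := hP1 q h (by rw [hfind q]; exact hle.1)
          rw [hfind q, hfind lp] at this
          omega
        · rcases List.mem_cons.mp h with h | h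
          · subst h; exact le_refl _
          · have := hP2 q h (by rw [hfind q]; exact hle.1)
            rw [hfind q, hfind lp] at this
            exact this
      omega
    -- nothing starts before i0
    have hbefore : ∀ j ∈ List.range i0, pvScanPhrases L j stancePhrasesA = none := by
      intro j hj
      have hjlt := List.mem_range.mp hj
      apply pv_scanPhrases_none
      intro q hq hpre
      have := hminN q hq j hpre
      omega
    -- lp is the first phrase starting at i0
    have hat : pvScanPhrases L i0 stancePhrasesA = some lp := by
      rw [hsp]
      apply pv_scanPhrases_some
      · intro q hq hpre
        have hle := pv_prefix_find_le L ((PySem.Str.lower q.2).toList) i0 hpre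
        have := hP1 q hq (by rw [hfind q]; exact hle.1)
        rw [hfind q, hfind lp] at this
        omega
      · exact hspec.1
    -- split the range at i0
    obtain ⟨k, hk⟩ : ∃ k, L.length = (i0 + 1) + k := ⟨L.length - (i0 + 1), by omega⟩
    have hrange : List.range L.length =
        List.range i0 ++ i0 :: (List.range k).map (fun x => (i0 + 1) + x) := by
      rw [hk, List.range_add, List.range_succ, List.append_assoc, List.singleton_append]
    have hscan : pvScanFrom L stancePhrasesA (List.range L.length) = some lp := by
      rw [hrange, pv_scanFrom_append, pv_scanFrom_none L _ _ hbefore, pvScanFrom, hat]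
    rw [hscan]
    -- and A's side returns the same pair
    have hFne : F ≠ [] := by
      intro hnil
      rw [hsel, hnil] at hgood
      cases hgood
    rw [if_neg hFne]
    rcases hs : PySem.List.sorted F (fun m => m.2.2) false with _ | ⟨m', rest⟩
    · rw [hs] at hhead
      rw [hgood] at hhead
      cases hhead
    · rw [hs] at hhead
      rw [hgood] at hhead
      injection hhead with hm
      rw [hm]

-- ===== VERDICT (by name: the statement is the Claim_ definition above) =====
theorem extract_stance_spec : Claim_equal_extract_stance := by
  intro text _
  show extract_stance text = extract_stance_alt text
  exact pv_final (PySem.Str.lower text)
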